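-- pv_equiv track=rewrite | github.com/EmuVlucht/Tools | obfuscator_dasar/JS_obfuscator.py | _add_noise
-- ===== SOURCE A (Python) =====
-- def _lcg_next(state):
--     """Linear Congruential Generator step"""
--     return (state * 1103515245 + 12345) & 0x7fffffff
--
-- def _add_noise(data: str, seed: int) -> str:
--     """Tambahkan noise chars . dan + secara deterministik"""
--     result = list(data)
--     noise = '.+'
--     count = max(1, len(data) // 15)
--
--     state = seed & 0x7fffffff
--     for _ in range(count):
--         state = _lcg_next(state)
--         pos = state % (len(result) + 1)
--         state = _lcg_next(state)
--         char = noise[state % 2]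
--         result.insert(pos, char)
--     return ''.join(result)
-- ===== SOURCE B (Python) =====
-- def _build(size):
--     """Complete binary tree over `size` slots; each node stores its number of free slots."""
--     if size == 1:
--         return (1, None, None)
--     half = size // 2
--     l = _build(half)
--     r = _build(size - half)
--     return (l[0] + r[0], l, r)
--
-- def _mark(node, size, p):
--     """Return (index of the (p+1)-th free slot, tree with that slot marked used)."""
--     if size == 1:
--         return 0, (0, None, None)
--     half = size // 2
--     l = node[1]
--     r = node[2]
--     if p < l[0]:
--         idx, nl = _mark(l, half, p)
--         return idx, (node[0] - 1, nl, r)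
--     else:
--         idx, nr = _mark(r, size - half, p - l[0])
--         return half + idx, (node[0] - 1, l, nr)
--
-- def _add_noise(data: str, seed: int) -> str:
--     """Same deterministic noise insertion without repeated O(n) list.insert:
--     generate all (pos, char) pairs first (positions depend only on len(data) and the
--     LCG state), then process them in reverse, placing each char directly at its final
--     slot: the last insertion sits at its position among all slots, and each earlier
--     one at its position among the slots not taken by later insertions, found via an
--     order-statistics tree; finally fill the remaining slots with data in order."""
--     n = len(data)
--     count = max(1, n // 15)
--     # phase 1: all (position, char) pairs from the LCG
--     state = seed & 0x7fffffff
--     pairs = []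
--     for i in range(count):
--         state = (state * 1103515245 + 12345) & 0x7fffffff
--         pos = state % (n + i + 1)
--         state = (state * 1103515245 + 12345) & 0x7fffffff
--         pairs.append((pos, '.+'[state % 2]))
--     # phase 2: reverse placement via the tree of free slots
--     N = n + count
--     tree = _build(N)
--     out = [None] * N
--     for p, c in reversed(pairs):
--         idx, tree = _mark(tree, N, p)
--         out[idx] = c
--     # phase 3: fill the gaps with data in order
--     it = iter(data)
--     return ''.join(next(it) if c is None else c for c in out)
-- ===== Notes on version B (the rewrite author's own statement) =====
-- stated objective: faster
-- what changed: B never calls list.insert on the growing character list: it first generates all LCG (position,char) pairs (positions depend only on len(data) and the evolving state), then walks them in reverse placing each char directly at its final output slot -- selected as the (pos+1)-th still-free slot via an order-statistics tree over the n+k output cells -- and finally fills the remaining slots with the original characters in one pass.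
import Mathlib
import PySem

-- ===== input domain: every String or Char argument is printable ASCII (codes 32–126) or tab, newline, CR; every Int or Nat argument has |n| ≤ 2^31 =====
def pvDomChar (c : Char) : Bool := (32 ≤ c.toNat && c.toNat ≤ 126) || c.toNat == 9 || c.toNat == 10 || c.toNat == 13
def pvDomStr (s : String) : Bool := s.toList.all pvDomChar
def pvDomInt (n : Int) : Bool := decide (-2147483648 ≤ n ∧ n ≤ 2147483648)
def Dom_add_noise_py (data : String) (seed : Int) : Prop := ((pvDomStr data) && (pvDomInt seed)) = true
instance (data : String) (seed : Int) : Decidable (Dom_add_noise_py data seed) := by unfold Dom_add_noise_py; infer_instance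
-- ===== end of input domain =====

-- B replaces A's repeated O(n) list.insert by generating all LCG (position,char) pairs
-- first, placing them in reverse via an order-statistics tree of free slots, and one
-- final fill pass (objective: faster; O((n+k) log n) vs A's O(n*k), k = max(1,n//15)).

-- ===== PORT A =====
-- helper _lcg_next
def lcg_next (state : Int) : Int :=
  PySem.Int.band (state * 1103515245 + 12345) 2147483647

def add_noise_py (data : String) (seed : Int) : String :=
  let result := data.toList
  let noise := ".+"
  let count : Int := max 1 (PySem.Int.floordiv (PySem.Str.len data) 15)
  let state : Int := PySem.Int.band seed 2147483647
  let fin := (PySem.List.pyRange 0 count 1).foldl (fun (rs : List Char × Int) _ =>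
      let state := lcg_next rs.2
      let pos := PySem.Int.mod state ((rs.1.length : Int) + 1)
      let state := lcg_next state
      let char := (PySem.Str.pyGet? noise (PySem.Int.mod state 2)).getD ' '
      (PySem.List.insert rs.1 pos char, state)) (result, state)
  String.ofList fin.1

-- ===== PORT B =====
-- port of Source B's final generator expression ''.join(next(it) if c is None else c for c in out):
-- walk `out`; a filled cell emits its char, an empty cell emits the next data char.
-- (the [none :: _, []] branch is unreachable: `out` has exactly len(data) empty cells)
def pvConsume : List (Option Char) → List Char → List Char
  | [], _ => []
  | some c :: os, xs => c :: pvConsume os xs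
  | none :: _, [] => []
  | none :: os, y :: ys => y :: pvConsume os ys

-- Source B's tuple trees (cnt, left, right) / (cnt, None, None); leaves are detected by
-- size == 1 exactly as in _mark, so the Bool "is leaf" never needs inspecting here
inductive PvTree
  | leaf (cnt : Int)
  | node (cnt : Int) (l : PvTree) (r : PvTree)
deriving DecidableEq, Repr

def PvTree.cnt : PvTree → Int
  | .leaf c => c
  | .node c _ _ => c

-- port of _build (size ≥ 1 always; the 0 case is unreachable padding)
def pvBuild : Nat → PvTree
  | 0 => .leaf 1
  | 1 => .leaf 1
  | size + 2 =>
    let half := (size + 2) / 2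
    let l := pvBuild half
    let r := pvBuild (size + 2 - half)
    .node (l.cnt + r.cnt) l r
termination_by size => size
decreasing_by all_goals omega

-- port of _mark (size ≥ 1 and, for size ≥ 2, a node: the other branches are
-- unreachable padding, as in Source B where they would be type errors)
def pvMark : PvTree → Nat → Int → Int × PvTree
  | _, 0, _ => (0, .leaf 0)
  | _, 1, _ => (0, .leaf 0)
  | t, size + 2, p =>
    match t with
    | .leaf c => (0, .leaf c)
    | .node c l r =>
      let half := (size + 2) / 2
      if p < l.cnt then
        let m := pvMark l half p
        (m.1, .node (c - 1) m.2 r)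
      else
        let m := pvMark r (size + 2 - half) (p - l.cnt)
        ((half : Int) + m.1, .node (c - 1) l m.2)
termination_by _ size _ => size
decreasing_by all_goals omega

def add_noise_py_alt (data : String) (seed : Int) : String :=
  let n := data.toList.length
  let count : Int := max 1 (PySem.Int.floordiv (n : Int) 15)
  -- phase 1: all (pos, char) pairs from the LCG
  let sp := (PySem.List.pyRange 0 count 1).foldl (fun (sp : Int × List (Int × Char)) i =>
      let state := PySem.Int.band (sp.1 * 1103515245 + 12345) 2147483647
      let pos := PySem.Int.mod state ((n : Int) + i + 1)
      let state2 := PySem.Int.band (state * 1103515245 + 12345) 2147483647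
      let ch := (PySem.Str.pyGet? ".+" (PySem.Int.mod state2 2)).getD ' '
      (state2, sp.2 ++ [(pos, ch)])) (PySem.Int.band seed 2147483647, [])
  -- phase 2: reverse placement via the tree of free slots
  -- (out[idx] = c: idx is always in range, so .set at idx.toNat is exact)
  let N := ((n : Int) + count).toNat
  let tree := pvBuild N
  let ot := sp.2.reverse.foldl (fun (ot : List (Option Char) × PvTree) pc =>
      let m := pvMark ot.2 N pc.1
      (ot.1.set m.1.toNat (some pc.2), m.2)) (List.replicate N (none : Option Char), tree)
  -- phase 3: fill the gaps with data in order
  String.ofList (pvConsume ot.1 data.toList)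

-- ===== PRECONDITION & SPEC =====
def Spec_add_noise_py (data : String) (seed : Int) (out : String) : Prop := out = add_noise_py_alt data seed
instance (data : String) (seed : Int) (out : String) : Decidable (Spec_add_noise_py data seed out) := by unfold Spec_add_noise_py; infer_instance

-- ===== CLAIM (what is proved, stated in full; the proofs are below) =====
def Claim_equal_add_noise_py : Prop := ∀ (data : String) (seed : Int), Dom_add_noise_py data seed → Spec_add_noise_py data seed (add_noise_py data seed)

-- ===== LEMMAS AND PROOFS =====

-- shared spec of the (position, char) pairs both loops generate
def pvState2 (st : Int) : Int := lcg_next (lcg_next st)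

def pvStateN (st : Int) : Nat → Int
  | 0 => st
  | k + 1 => pvStateN (pvState2 st) k

def pvPairsFrom (st : Int) (m : Int) : Nat → List (Int × Char)
  | 0 => []
  | k + 1 =>
    (PySem.Int.mod (lcg_next st) (m + 1),
      (PySem.Str.pyGet? ".+" (PySem.Int.mod (pvState2 st) 2)).getD ' ')
      :: pvPairsFrom (pvState2 st) (m + 1) k

-- sequential Python list.insert, as A performs it
def pvApplyIns (xs : List Char) (ps : List (Int × Char)) : List Char :=
  ps.foldl (fun r pc => PySem.List.insert r pc.1 pc.2) xs

-- sequential List.insertIdx on the option array (bridge between A and B)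
def pvArrFold (arr : List (Option Char)) (ps : List (Int × Char)) : List (Option Char) :=
  ps.foldl (fun a pc => a.insertIdx pc.1.toNat (some pc.2)) arr

-- validity of an insertion sequence: the i-th position is in [0, N + i]
def pvValidFrom : Int → List (Int × Char) → Prop
  | _, [] => True
  | N, pc :: tl => 0 ≤ pc.1 ∧ pc.1 ≤ N ∧ pvValidFrom (N + 1) tl

-- the fringe of free/used flags a tree represents, and its well-formedness at a size
def PvTree.toL : PvTree → List Bool
  | .leaf c => [c == 1]
  | .node _ l r => l.toL ++ r.toL

def PvWf : PvTree → Nat → Prop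
  | .leaf c, size => size = 1 ∧ (c = 0 ∨ c = 1)
  | .node c l r, size => 2 ≤ size ∧ PvWf l (size / 2) ∧ PvWf r (size - size / 2) ∧ c = l.cnt + r.cnt

-- list-level spec of _mark: index of the (p+1)-th true, and that true set to false
def pvSpecMark : List Bool → Nat → Nat × List Bool
  | [], _ => (0, [])
  | true :: bs, 0 => (0, false :: bs)
  | true :: bs, p + 1 => let m := pvSpecMark bs p; (m.1 + 1, true :: m.2)
  | false :: bs, p => let m := pvSpecMark bs p; (m.1 + 1, false :: m.2)

-- array-level spec: write c into the (p+1)-th free (none) cell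
def pvSpecPlace : List (Option Char) → Nat → Char → List (Option Char)
  | [], _, _ => []
  | some c0 :: A, p, c => some c0 :: pvSpecPlace A p c
  | none :: A, 0, c => some c :: A
  | none :: A, p + 1, c => none :: pvSpecPlace A p c

-- fill the none cells of A with the cells of arr, in order
def pvEmbed : List (Option Char) → List (Option Char) → List (Option Char)
  | [], _ => []
  | some c :: A, arr => some c :: pvEmbed A arr
  | none :: A, [] => none :: pvEmbed A []
  | none :: A, x :: arr => x :: pvEmbed A arr

-- B's phase 2, abstractly: place the pairs back to front into an all-free array
def pvRevBuild (N : Nat) : List (Int × Char) → List (Option Char)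
  | [] => List.replicate N none
  | pc :: tl => pvSpecPlace (pvRevBuild N tl) pc.1.toNat pc.2

theorem pvWf_length (t : PvTree) : ∀ (s : Nat), PvWf t s → t.toL.length = s := by
  induction t with
  | leaf c =>
    intro s hs
    simp [PvTree.toL, PvWf] at hs ⊢
    omega
  | node c l r ihl ihr =>
    intro s hs
    obtain ⟨h2, hl, hr, _⟩ := hs
    simp [PvTree.toL, ihl _ hl, ihr _ hr]
    omega

theorem pvWf_cnt (t : PvTree) : ∀ (s : Nat), PvWf t s → t.cnt = (t.toL.countP id : Int) := by
  induction t with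
  | leaf c =>
    intro s hs
    obtain ⟨-, hc⟩ := hs
    rcases hc with rfl | rfl <;> simp [PvTree.toL, PvTree.cnt]
  | node c l r ihl ihr =>
    intro s hs
    obtain ⟨h2, hl, hr, hc⟩ := hs
    have el := ihl _ hl
    have er := ihr _ hr
    simp only [PvTree.toL, PvTree.cnt, List.countP_append] at *
    rw [hc, el, er]
    push_cast
    ring

theorem pvBuild_wf (s : Nat) (hs : 1 ≤ s) :
    PvWf (pvBuild s) s ∧ (pvBuild s).toL = List.replicate s true := by
  induction s using pvBuild.induct with
  | case1 => omega
  | case2 => simp [pvBuild, PvWf, PvTree.toL]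
  | case3 size half ihl ihr =>
    have hhalf : half = (size + 2) / 2 := rfl
    have h1 : 1 ≤ half := by omega
    have h2 : 1 ≤ size + 2 - half := by omega
    obtain ⟨wl, tl⟩ := ihl h1
    obtain ⟨wr, tr⟩ := ihr h2
    constructor
    · rw [pvBuild]
      exact ⟨by omega, wl, wr, rfl⟩
    · rw [pvBuild]
      show (pvBuild half).toL ++ (pvBuild (size + 2 - half)).toL = List.replicate (size + 2) true
      rw [tl, tr, List.replicate_append_replicate]
      congr 1
      omega

theorem pvSpecMark_append (xs : List Bool) : ∀ (ys : List Bool) (p : Nat),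
    pvSpecMark (xs ++ ys) p =
      if p < xs.countP id then ((pvSpecMark xs p).1, (pvSpecMark xs p).2 ++ ys)
      else (xs.length + (pvSpecMark ys (p - xs.countP id)).1, xs ++ (pvSpecMark ys (p - xs.countP id)).2) := by
  induction xs with
  | nil =>
    intro ys p
    simp
  | cons b bs ih =>
    intro ys p
    cases b with
    | true =>
      cases p with
      | zero => simp [pvSpecMark]
      | succ p' =>
        have hcnt : List.countP id (true :: bs) = List.countP id bs + 1 := by simp
        simp only [List.cons_append, pvSpecMark, ih ys p', hcnt]
        by_cases h : p' < bs.countP id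
        · rw [if_pos h, if_pos (by omega)]
        · rw [if_neg h, if_neg (by omega)]
          have hsub : p' + 1 - (bs.countP id + 1) = p' - bs.countP id := by omega
          rw [hsub]
          refine Prod.ext ?_ ?_
          · simp
            omega
          · simp
    | false =>
      have hcnt : List.countP id (false :: bs) = List.countP id bs := by simp
      simp only [List.cons_append, pvSpecMark, ih ys p, hcnt]
      by_cases h : p < bs.countP id
      · rw [if_pos h, if_pos h]
      · rw [if_neg h, if_neg h]
        refine Prod.ext ?_ ?_
        · simp
          omega
        · simp

theorem pvSpecMark_countP (bs : List Bool) : ∀ (p : Nat), p < bs.countP id →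
    (pvSpecMark bs p).2.countP id + 1 = bs.countP id := by
  induction bs with
  | nil => intro p h; simp at h
  | cons b bs ih =>
    intro p h
    cases b with
    | true =>
      cases p with
      | zero => simp [pvSpecMark]
      | succ p' =>
        have h' : p' < bs.countP id := by simp at h; omega
        simp only [pvSpecMark, List.countP_cons]
        have := ih p' h'
        simp
        omega
    | false =>
      have h' : p < bs.countP id := by simpa using h
      simp only [pvSpecMark, List.countP_cons]
      have := ih p h'
      simp
      omega

theorem pvMark_spec (t : PvTree) : ∀ (s : Nat) (p : Int), PvWf t s → 0 ≤ p → p < t.cnt →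
    (pvMark t s p).1 = ((pvSpecMark t.toL p.toNat).1 : Int)
    ∧ (pvMark t s p).2.toL = (pvSpecMark t.toL p.toNat).2
    ∧ PvWf (pvMark t s p).2 s := by
  induction t with
  | leaf c =>
    intro s p wf h0 hlt
    obtain ⟨hs1, hc⟩ := wf
    subst hs1
    have hcnt : PvTree.cnt (.leaf c) = c := rfl
    rw [hcnt] at hlt
    have hc1 : c = 1 := by omega
    have hp0 : p = 0 := by omega
    subst hc1; subst hp0
    refine ⟨?_, ?_, ?_⟩
    · simp [pvMark, pvSpecMark, PvTree.toL]
    · simp [pvMark, pvSpecMark, PvTree.toL]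
    · simp only [pvMark]
      exact ⟨rfl, Or.inl rfl⟩
  | node c l r ihl ihr =>
    intro s p wf h0 hlt
    obtain ⟨h2, wl, wr, hc⟩ := wf
    obtain ⟨s', rfl⟩ : ∃ s', s = s' + 2 := ⟨s - 2, by omega⟩
    have hcl := pvWf_cnt l _ wl
    have hcr := pvWf_cnt r _ wr
    have hll := pvWf_length l _ wl
    have hlr := pvWf_length r _ wr
    have htl : PvTree.toL (.node c l r) = l.toL ++ r.toL := rfl
    have hcnt : PvTree.cnt (.node c l r) = c := rfl
    rw [hcnt] at hlt
    rw [htl, pvSpecMark_append]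
    by_cases hbr : p < l.cnt
    · have hbn : p.toNat < l.toL.countP id := by omega
      rw [if_pos hbn]
      obtain ⟨e1, e2, e3⟩ := ihl ((s' + 2) / 2) p wl h0 hbr
      have hnc : (pvMark l ((s' + 2) / 2) p).2.cnt = l.cnt - 1 := by
        rw [pvWf_cnt _ _ e3, e2]
        have := pvSpecMark_countP l.toL p.toNat (by omega)
        omega
      rw [pvMark]
      simp only [if_pos hbr]
      refine ⟨e1, ?_, ?_⟩
      · show (pvMark l ((s' + 2) / 2) p).2.toL ++ r.toL = _
        rw [e2]
      · exact ⟨h2, e3, wr, by omega⟩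
    · have hbn : ¬ p.toNat < l.toL.countP id := by omega
      rw [if_neg hbn]
      have h0' : 0 ≤ p - l.cnt := by omega
      have hlt' : p - l.cnt < r.cnt := by omega
      obtain ⟨e1, e2, e3⟩ := ihr (s' + 2 - (s' + 2) / 2) (p - l.cnt) wr h0' hlt'
      have hsub : (p - l.cnt).toNat = p.toNat - l.toL.countP id := by omega
      have hnc : (pvMark r (s' + 2 - (s' + 2) / 2) (p - l.cnt)).2.cnt = r.cnt - 1 := by
        rw [pvWf_cnt _ _ e3, e2]
        have := pvSpecMark_countP r.toL (p - l.cnt).toNat (by omega)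
        omega
      rw [pvMark]
      simp only [if_neg hbr]
      refine ⟨?_, ?_, ?_⟩
      · show ((s' + 2) / 2 : Int) + (pvMark r (s' + 2 - (s' + 2) / 2) (p - l.cnt)).1 = _
        rw [e1, ← hsub, hll]
        push_cast
        ring
      · show l.toL ++ (pvMark r (s' + 2 - (s' + 2) / 2) (p - l.cnt)).2.toL = _
        rw [e2, hsub]
      · exact ⟨h2, wl, e3, by omega⟩

theorem pvSet_specMark (A : List (Option Char)) : ∀ (p : Nat) (c : Char),
    p < A.countP (fun o => o.isNone) →
    A.set (pvSpecMark (A.map (fun o => o.isNone)) p).1 (some c) = pvSpecPlace A p c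
    ∧ (pvSpecPlace A p c).map (fun o => o.isNone) = (pvSpecMark (A.map (fun o => o.isNone)) p).2 := by
  induction A with
  | nil => intro p c h; simp at h
  | cons a A ih =>
    intro p c h
    cases a with
    | some c0 =>
      have h' : p < A.countP (fun o => o.isNone) := by simpa using h
      obtain ⟨e1, e2⟩ := ih p c h'
      simp only [List.map_cons, Option.isNone_some, pvSpecMark, pvSpecPlace, List.set_cons_succ]
      exact ⟨by rw [e1], by rw [← e2]⟩
    | none =>
      cases p with
      | zero => simp [pvSpecMark, pvSpecPlace]
      | succ p' =>
        have h' : p' < A.countP (fun o => o.isNone) := by simp at h; omega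
        obtain ⟨e1, e2⟩ := ih p' c h'
        simp only [List.map_cons, Option.isNone_none, pvSpecMark, pvSpecPlace, List.set_cons_succ]
        exact ⟨by rw [e1], by rw [← e2]⟩

theorem pvSpecPlace_countP (A : List (Option Char)) : ∀ (p : Nat) (c : Char),
    p < A.countP (fun o => o.isNone) →
    (pvSpecPlace A p c).countP (fun o => o.isNone) + 1 = A.countP (fun o => o.isNone) := by
  induction A with
  | nil => intro p c h; simp at h
  | cons a A ih =>
    intro p c h
    cases a with
    | some c0 =>
      have h' : p < A.countP (fun o => o.isNone) := by simpa using h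
      simp only [pvSpecPlace, List.countP_cons]
      have := ih p c h'
      simp
      omega
    | none =>
      cases p with
      | zero => simp [pvSpecPlace]
      | succ p' =>
        have h' : p' < A.countP (fun o => o.isNone) := by simp at h; omega
        simp only [pvSpecPlace, List.countP_cons]
        have := ih p' c h'
        simp
        omega

theorem pvRevBuild_countP (tl : List (Int × Char)) : ∀ (M : Int) (N : Nat),
    pvValidFrom M tl → 0 ≤ M → M + (tl.length : Int) = (N : Int) →
    ((pvRevBuild N tl).countP (fun o => o.isNone) : Int) = M := by
  induction tl with
  | nil =>
    intro M N hv h0 hMN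
    simp [pvRevBuild, List.countP_replicate]
    simp at hMN
    omega
  | cons pc tl ih =>
    intro M N hv h0 hMN
    obtain ⟨hp0, hple, hvtl⟩ := hv
    have hIH := ih (M + 1) N hvtl (by omega) (by simp at hMN; omega)
    show ((pvSpecPlace (pvRevBuild N tl) pc.1.toNat pc.2).countP (fun o => o.isNone) : Int) = M
    have hlt : pc.1.toNat < (pvRevBuild N tl).countP (fun o => o.isNone) := by omega
    have := pvSpecPlace_countP (pvRevBuild N tl) pc.1.toNat pc.2 hlt
    omega

theorem pvEmbed_place (A : List (Option Char)) : ∀ (arr : List (Option Char)) (p : Nat) (c : Char),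
    A.countP (fun o => o.isNone) = arr.length + 1 → p ≤ arr.length →
    pvEmbed (pvSpecPlace A p c) arr = pvEmbed A (arr.insertIdx p (some c)) := by
  induction A with
  | nil => intro arr p c h hp; simp at h
  | cons a A ih =>
    intro arr p c h hp
    cases a with
    | some c0 =>
      have h' : A.countP (fun o => o.isNone) = arr.length + 1 := by simpa using h
      simp only [pvSpecPlace, pvEmbed]
      rw [ih arr p c h' hp]
    | none =>
      cases p with
      | zero =>
        cases arr with
        | nil => simp [pvSpecPlace, pvEmbed, List.insertIdx_zero]
        | cons x arr' => simp [pvSpecPlace, pvEmbed, List.insertIdx_zero]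
      | succ p' =>
        cases arr with
        | nil => simp at hp
        | cons x arr' =>
          have h' : A.countP (fun o => o.isNone) = arr'.length + 1 := by
            simp at h; omega
          simp only [pvSpecPlace, List.insertIdx_succ_cons, pvEmbed]
          rw [ih arr' p' c h' (by simpa using hp)]

theorem pvEmbed_none (A : List (Option Char)) : ∀ (m : Nat),
    A.countP (fun o => o.isNone) = m → pvEmbed A (List.replicate m none) = A := by
  induction A with
  | nil => intro m h; rfl
  | cons a A ih =>
    intro m h
    cases a with
    | some c =>
      have h' : A.countP (fun o => o.isNone) = m := by simpa using h
      simp only [pvEmbed]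
      rw [ih m h']
    | none =>
      obtain ⟨m', rfl⟩ : ∃ m', m = m' + 1 := by
        simp at h
        exact ⟨A.countP (fun o => o.isNone), by omega⟩
      have h' : A.countP (fun o => o.isNone) = m' := by simp at h; omega
      rw [List.replicate_succ]
      simp only [pvEmbed]
      rw [ih m' h']

theorem pvEmbed_blank (m : Nat) : ∀ (arr : List (Option Char)), arr.length = m →
    pvEmbed (List.replicate m (none : Option Char)) arr = arr := by
  induction m with
  | zero =>
    intro arr h
    have : arr = [] := List.eq_nil_of_length_eq_zero h
    subst this
    rfl
  | succ m ih =>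
    intro arr h
    cases arr with
    | nil => simp at h
    | cons x arr' =>
      rw [List.replicate_succ]
      simp only [pvEmbed]
      rw [ih arr' (by simpa using h)]

theorem pvArrFold_rev (ps : List (Int × Char)) : ∀ (arr : List (Option Char)),
    pvValidFrom (arr.length : Int) ps →
    pvArrFold arr ps = pvEmbed (pvRevBuild (arr.length + ps.length) ps) arr := by
  induction ps with
  | nil =>
    intro arr _
    show arr = pvEmbed (List.replicate (arr.length + 0) none) arr
    rw [pvEmbed_blank _ arr (by omega)]
  | cons pc tl ih =>
    intro arr hv
    obtain ⟨hp0, hple, hvtl⟩ := hv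
    have hpn : pc.1.toNat ≤ arr.length := by omega
    have harr' : (arr.insertIdx pc.1.toNat (some pc.2)).length = arr.length + 1 := by
      rw [List.length_insertIdx]
      simp [hpn]
    have hv' : pvValidFrom ((arr.insertIdx pc.1.toNat (some pc.2)).length : Int) tl := by
      rw [harr']
      push_cast
      exact hvtl
    have hN : (arr.insertIdx pc.1.toNat (some pc.2)).length + tl.length
        = arr.length + (pc :: tl).length := by
      rw [harr']
      simp
      omega
    have hcnt : (pvRevBuild (arr.length + (pc :: tl).length) tl).countP (fun o => o.isNone)
        = arr.length + 1 := by
      have := pvRevBuild_countP tl ((arr.length : Int) + 1) (arr.length + (pc :: tl).length)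
        (by exact hvtl) (by omega) (by simp; omega)
      omega
    calc pvArrFold arr (pc :: tl)
        = pvArrFold (arr.insertIdx pc.1.toNat (some pc.2)) tl := rfl
      _ = pvEmbed (pvRevBuild ((arr.insertIdx pc.1.toNat (some pc.2)).length + tl.length) tl)
            (arr.insertIdx pc.1.toNat (some pc.2)) := ih _ hv'
      _ = pvEmbed (pvRevBuild (arr.length + (pc :: tl).length) tl)
            (arr.insertIdx pc.1.toNat (some pc.2)) := by rw [hN]
      _ = pvEmbed (pvSpecPlace (pvRevBuild (arr.length + (pc :: tl).length) tl) pc.1.toNat pc.2)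
            arr := (pvEmbed_place _ arr pc.1.toNat pc.2 hcnt hpn).symm
      _ = pvEmbed (pvRevBuild (arr.length + (pc :: tl).length) (pc :: tl)) arr := rfl

theorem pvLoopRev (ps : List (Int × Char)) : ∀ (M : Int) (N : Nat),
    pvValidFrom M ps → 0 ≤ M → M + (ps.length : Int) = (N : Int) → 1 ≤ N →
    (ps.foldr (fun pc ot =>
        ((ot.1 : List (Option Char)).set (pvMark ot.2 N pc.1).1.toNat (some pc.2),
          (pvMark ot.2 N pc.1).2)) (List.replicate N (none : Option Char), pvBuild N)).1
      = pvRevBuild N ps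
    ∧ (ps.foldr (fun pc ot =>
        ((ot.1 : List (Option Char)).set (pvMark ot.2 N pc.1).1.toNat (some pc.2),
          (pvMark ot.2 N pc.1).2)) (List.replicate N (none : Option Char), pvBuild N)).2.toL
      = (pvRevBuild N ps).map (fun o => o.isNone)
    ∧ PvWf (ps.foldr (fun pc ot =>
        ((ot.1 : List (Option Char)).set (pvMark ot.2 N pc.1).1.toNat (some pc.2),
          (pvMark ot.2 N pc.1).2)) (List.replicate N (none : Option Char), pvBuild N)).2 N := by
  induction ps with
  | nil =>
    intro M N hv h0 hMN h1
    simp only [List.foldr_nil]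
    refine ⟨rfl, ?_, (pvBuild_wf N h1).1⟩
    rw [(pvBuild_wf N h1).2]
    show List.replicate N true = (List.replicate N (none : Option Char)).map (fun o => o.isNone)
    simp
  | cons pc tl ih =>
    intro M N hv h0 hMN h1
    obtain ⟨hp0, hple, hvtl⟩ := hv
    obtain ⟨e1, e2, e3⟩ := ih (M + 1) N hvtl (by omega) (by simp at hMN; omega) h1
    simp only [List.foldr_cons]
    set F := tl.foldr (fun pc ot =>
        ((ot.1 : List (Option Char)).set (pvMark ot.2 N pc.1).1.toNat (some pc.2),
          (pvMark ot.2 N pc.1).2)) (List.replicate N (none : Option Char), pvBuild N) with hF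
    have hcnt : ((pvRevBuild N tl).countP (fun o => o.isNone) : Int) = M + 1 :=
      pvRevBuild_countP tl (M + 1) N hvtl (by omega) (by simp at hMN; omega)
    have hcntF : F.2.cnt = M + 1 := by
      rw [pvWf_cnt _ _ e3, e2]
      have hmap : (((pvRevBuild N tl).map (fun o => o.isNone)).countP id)
          = (pvRevBuild N tl).countP (fun o => o.isNone) := by
        rw [List.countP_map]
        rfl
      rw [hmap]
      omega
    obtain ⟨m1, m2, m3⟩ := pvMark_spec F.2 N pc.1 e3 hp0 (by omega)
    have hsm := pvSet_specMark F.1 pc.1.toNat pc.2 (by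
      rw [e1]
      omega)
    rw [e2] at m1 m2
    refine ⟨?_, ?_, m3⟩
    · show F.1.set (pvMark F.2 N pc.1).1.toNat (some pc.2) = _
      rw [m1]
      simp only [Int.toNat_natCast]
      rw [e1] at hsm ⊢
      exact hsm.1
    · show (pvMark F.2 N pc.1).2.toL = _
      rw [m2]
      show _ = (pvSpecPlace (pvRevBuild N tl) pc.1.toNat pc.2).map (fun o => o.isNone)
      rw [e1] at hsm
      exact hsm.2.symm

theorem pvLength_pairsFrom (k : Nat) : ∀ (st m : Int), (pvPairsFrom st m k).length = k := by
  induction k with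
  | zero => intro st m; rfl
  | succ k ih => intro st m; simp [pvPairsFrom, ih]

theorem pvValid_pairsFrom (k : Nat) : ∀ (st m : Int), 0 ≤ m → pvValidFrom m (pvPairsFrom st m k) := by
  induction k with
  | zero => intro st m hm; trivial
  | succ k ih =>
    intro st m hm
    refine ⟨?_, ?_, ih (pvState2 st) (m + 1) (by omega)⟩
    · exact PySem.Int.mod_nonneg _ (by omega)
    · have := PySem.Int.mod_lt (lcg_next st) (b := m + 1) (by omega)
      omega

-- ===== A-side loop characterisation =====

theorem pvFoldA (l : List Int) : ∀ (xs : List Char) (st : Int),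
    l.foldl (fun (rs : List Char × Int) _ =>
      (PySem.List.insert rs.1
          (PySem.Int.mod (lcg_next rs.2) ((rs.1.length : Int) + 1))
          ((PySem.Str.pyGet? ".+" (PySem.Int.mod (lcg_next (lcg_next rs.2)) 2)).getD ' '),
        lcg_next (lcg_next rs.2))) (xs, st)
    = (pvApplyIns xs (pvPairsFrom st (xs.length : Int) l.length), pvStateN st l.length) := by
  induction l with
  | nil => intro xs st; rfl
  | cons a tl ih =>
    intro xs st
    simp only [List.foldl_cons]
    rw [ih]
    have hlen : (((PySem.List.insert xs
        (PySem.Int.mod (lcg_next st) ((xs.length : Int) + 1))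
        ((PySem.Str.pyGet? ".+" (PySem.Int.mod (lcg_next (lcg_next st)) 2)).getD ' ')).length : Int))
        = (xs.length : Int) + 1 := by
      rw [PySem.List.length_insert]
      push_cast
      ring
    rw [hlen]
    rfl

-- ===== B-side phase-1 loop characterisation =====

theorem pvFoldB (n : Nat) (k : Nat) : ∀ (j c : Int), j + k = c →
    ∀ (st : Int) (acc : List (Int × Char)),
    (PySem.List.pyRange j c 1).foldl (fun (sp : Int × List (Int × Char)) i =>
      (PySem.Int.band
          (PySem.Int.band (sp.1 * 1103515245 + 12345) 2147483647 * 1103515245 + 12345) 2147483647,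
        sp.2 ++ [(PySem.Int.mod (PySem.Int.band (sp.1 * 1103515245 + 12345) 2147483647)
            ((n : Int) + i + 1),
          (PySem.Str.pyGet? ".+"
              (PySem.Int.mod (PySem.Int.band
                (PySem.Int.band (sp.1 * 1103515245 + 12345) 2147483647 * 1103515245 + 12345)
                2147483647) 2)).getD ' ')])) (st, acc)
    = (pvStateN st k, acc ++ pvPairsFrom st ((n : Int) + j) k) := by
  induction k with
  | zero =>
    intro j c hjc st acc
    rw [PySem.List.pyRange_one_eq_nil (by omega)]
    simp [pvPairsFrom, pvStateN]
  | succ k ih =>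
    intro j c hjc st acc
    rw [PySem.List.pyRange_one_cons (by push_cast at hjc ⊢; omega)]
    simp only [List.foldl_cons]
    rw [ih (j + 1) c (by push_cast at hjc ⊢; omega)]
    have h1 : (n : Int) + (j + 1) = ((n : Int) + j) + 1 := by ring
    rw [h1, List.append_assoc]
    rfl

theorem pvCountP_insertIdx {α : Type} (l : List α) : ∀ (p : Nat) (a : α) (f : α → Bool), p ≤ l.length →
    (l.insertIdx p a).countP f = (if f a then 1 else 0) + l.countP f := by
  induction l with
  | nil =>
    intro p a f hp
    have hp0 : p = 0 := by simpa using hp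
    subst hp0
    simp [List.insertIdx]
  | cons x xs ih =>
    intro p a f hp
    cases p with
    | zero => simp [List.countP_cons]; split_ifs <;> omega
    | succ p' =>
      simp only [List.insertIdx_succ_cons, List.countP_cons]
      rw [ih p' a f (by simpa using hp)]
      split_ifs <;> omega

theorem pvInsert_cons (y : Char) (ys : List Char) (p : Nat) (c : Char) (h : p ≤ ys.length) :
    PySem.List.insert (y :: ys) ((p : Int) + 1) c = y :: PySem.List.insert ys (p : Int) c := by
  have h1 : ((p + 1 : Nat) : Int) = (p : Int) + 1 := by push_cast; ring
  rw [← h1, PySem.List.insert_natCast _ _ _ (by simpa using Nat.succ_le_succ h),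
    PySem.List.insert_natCast _ _ _ h]
  simp

-- ===== consume lemmas =====

theorem pvConsume_length (arr : List (Option Char)) : ∀ (xs : List Char),
    arr.countP (fun o => o.isNone) = xs.length → (pvConsume arr xs).length = arr.length := by
  induction arr with
  | nil => intro xs h; rfl
  | cons a os ih =>
    intro xs h
    cases a with
    | some c => simpa [pvConsume] using ih xs (by simpa [List.countP_cons] using h)
    | none =>
      cases xs with
      | nil => simp at h
      | cons y ys =>
        simpa [pvConsume] using ih ys (by
          simp at h; omega)

theorem pvConsume_replicate (xs : List Char) :
    pvConsume (List.replicate xs.length none) xs = xs := by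
  induction xs with
  | nil => rfl
  | cons y ys ih => simpa [List.replicate_succ, pvConsume] using ih

-- one Python insert = one insertIdx on the option array

theorem pvCore (arr : List (Option Char)) : ∀ (p : Nat) (xs : List Char) (c : Char),
    p ≤ arr.length → arr.countP (fun o => o.isNone) = xs.length →
    pvConsume (arr.insertIdx p (some c)) xs = PySem.List.insert (pvConsume arr xs) (p : Int) c := by
  induction arr with
  | nil =>
    intro p xs c hp hcnt
    have hp0 : p = 0 := by simpa using hp
    subst hp0
    simp [pvConsume, PySem.List.insert_zero]
  | cons a os ih =>
    intro p xs c hp hcnt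
    cases p with
    | zero =>
      simp [List.insertIdx_zero, pvConsume, PySem.List.insert_zero]
    | succ p' =>
      rw [List.insertIdx_succ_cons]
      cases a with
      | some c0 =>
        have hcnt' : os.countP (fun o => o.isNone) = xs.length := by
          simpa [List.countP_cons] using hcnt
        have hlen : (pvConsume os xs).length = os.length := pvConsume_length os xs hcnt'
        have h1 : ((p' + 1 : Nat) : Int) = (p' : Int) + 1 := by push_cast; ring
        rw [h1]
        simp only [pvConsume]
        rw [ih p' xs c (by simp at hp; omega) hcnt',
          ← pvInsert_cons c0 (pvConsume os xs) p' c (by rw [hlen]; simp at hp; omega)]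
      | none =>
        cases xs with
        | nil => simp at hcnt
        | cons y ys =>
          have hcnt' : os.countP (fun o => o.isNone) = ys.length := by
            simp at hcnt; omega
          have hlen : (pvConsume os ys).length = os.length := pvConsume_length os ys hcnt'
          have h1 : ((p' + 1 : Nat) : Int) = (p' : Int) + 1 := by push_cast; ring
          rw [h1]
          simp only [pvConsume]
          rw [ih p' ys c (by simp at hp; omega) hcnt',
            ← pvInsert_cons y (pvConsume os ys) p' c (by rw [hlen]; simp at hp; omega)]

-- A's insert sequence on chars = insertIdx sequence on the array, seen through pvConsume

theorem pvL2 (ps : List (Int × Char)) : ∀ (arr : List (Option Char)) (xs : List Char),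
    pvValidFrom (arr.length : Int) ps → arr.countP (fun o => o.isNone) = xs.length →
    pvApplyIns (pvConsume arr xs) ps = pvConsume (pvArrFold arr ps) xs := by
  induction ps with
  | nil => intro arr xs _ _; rfl
  | cons pc tl ih =>
    intro arr xs hv hcnt
    obtain ⟨h0, hle, hvtl⟩ := hv
    have hpn : (pc.1.toNat : Int) = pc.1 := Int.toNat_of_nonneg h0
    have hple : pc.1.toNat ≤ arr.length := by omega
    have step := pvCore arr pc.1.toNat xs pc.2 hple hcnt
    rw [hpn] at step
    have hlen' : (arr.insertIdx pc.1.toNat (some pc.2)).length = arr.length + 1 := by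
      rw [List.length_insertIdx]
      simp [hple]
    have hcnt' : (arr.insertIdx pc.1.toNat (some pc.2)).countP (fun o => o.isNone)
        = xs.length := by
      rw [pvCountP_insertIdx arr pc.1.toNat (some pc.2) _ hple]
      simpa using hcnt
    have hv' : pvValidFrom (((arr.insertIdx pc.1.toNat (some pc.2)).length : Nat) : Int) tl := by
      rw [hlen']
      push_cast
      exact hvtl
    calc pvApplyIns (pvConsume arr xs) (pc :: tl)
        = pvApplyIns (PySem.List.insert (pvConsume arr xs) pc.1 pc.2) tl := rfl
      _ = pvApplyIns (pvConsume (arr.insertIdx pc.1.toNat (some pc.2)) xs) tl := by rw [← step]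
      _ = pvConsume (pvArrFold (arr.insertIdx pc.1.toNat (some pc.2)) tl) xs :=
          ih _ xs hv' hcnt'
      _ = pvConsume (pvArrFold arr (pc :: tl)) xs := rfl

-- B's bump-resolution + scatter = insertIdx sequence on the array

theorem pvMain (data : String) (seed : Int) :
    add_noise_py data seed = add_noise_py_alt data seed := by
  classical
  simp only [add_noise_py, add_noise_py_alt, PySem.Str.len_eq]
  set n : Nat := data.toList.length with hn
  set c : Int := max 1 (PySem.Int.floordiv (n : Int) 15) with hcdef
  have hc1 : (1 : Int) ≤ c := le_max_left _ _
  set st0 : Int := PySem.Int.band seed 2147483647 with hst0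
  set k : Nat := c.toNat with hk
  rw [pvFoldA (PySem.List.pyRange 0 c 1) data.toList st0]
  rw [pvFoldB n k 0 c (by omega) st0 []]
  simp only [PySem.List.length_pyRange_one]
  have hsub : ((c - 0).toNat) = k := by omega
  rw [hsub]
  set ps : List (Int × Char) := pvPairsFrom st0 (n : Int) k with hps
  have hzero : ((n : Int) + 0) = (n : Int) := by ring
  rw [hzero]
  have hNN : ((n : Int) + c).toNat = n + k := by omega
  rw [hNN]
  have hval : pvValidFrom ((n : Int)) ps := pvValid_pairsFrom k st0 (n : Int) (by omega)
  have hlen : ps.length = k := pvLength_pairsFrom k st0 (n : Int)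
  simp only [List.nil_append]
  rw [List.foldl_reverse]
  obtain ⟨L1, -, -⟩ := pvLoopRev ps ((n : Int)) (n + k) hval (by omega)
    (by rw [hlen]; push_cast; ring) (by omega)
  rw [L1]
  have G := pvArrFold_rev ps (List.replicate n none) (by simpa using hval)
  rw [List.length_replicate, hlen] at G
  have hcnt7 : ((pvRevBuild (n + k) ps).countP (fun o => o.isNone) : Int) = (n : Int) :=
    pvRevBuild_countP ps ((n : Int)) (n + k) hval (by omega) (by rw [hlen]; push_cast; ring)
  have hemb : pvEmbed (pvRevBuild (n + k) ps) (List.replicate n none) = pvRevBuild (n + k) ps :=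
    pvEmbed_none _ n (by exact_mod_cast hcnt7)
  have hcnt : (List.replicate n (none : Option Char)).countP (fun o => o.isNone) = data.toList.length := by
    simp [List.countP_replicate, hn]
  have L2inst := pvL2 ps (List.replicate n none) data.toList (by simpa using hval) hcnt
  rw [pvConsume_replicate] at L2inst
  rw [G, hemb] at L2inst
  rw [L2inst]

-- ===== VERDICT (by name: the statement is the Claim_ definition above) =====
theorem add_noise_py_spec : Claim_equal_add_noise_py := by
  intro data seed _
  show add_noise_py data seed = add_noise_py_alt data seed
  exact pvMain data seed
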